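-- pv_equiv track=rewrite | github.com/juanigremes/Introduccion-a-la-programacion | Python/parcialFiltrado1.py | stock_productos
-- ===== SOURCE A (Python) =====
-- def stock_productos (stock_cambios: list[tuple[str,int]]) -> dict[str,tuple[int,int]]:
--     res: dict[str,tuple[int,int]] = {}
--     for tupla in stock_cambios:
--         producto: str = tupla[0]
--         nuevoValor: int = tupla[1]
--         if producto in res.keys():
--             mayorYmenor: tuple[int,int] = res[producto]
--             mayor: int = mayorYmenor[1]
--             menor: int = mayorYmenor[0]
--             if nuevoValor < menor:
--                 res[producto] = [nuevoValor,mayor]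
--             elif nuevoValor > mayor:
--                 res[producto] = [menor,nuevoValor]
--         else:
--             res[producto] = [nuevoValor,nuevoValor]
--     return res
-- ===== SOURCE B (Python) =====
-- def stock_productos(stock_cambios: list[tuple[str, int]]) -> dict[str, tuple[int, int]]:
--     # Gather values per product (first-appearance key order), then reduce with min/max.
--     grupos: dict[str, list[int]] = {}
--     for producto, valor in stock_cambios:
--         grupos[producto] = grupos.get(producto, []) + [valor]
--     res: dict[str, tuple[int, int]] = {}
--     for producto, valores in grupos.items():
--         res[producto] = [min(valores), max(valores)]
--     return res
-- ===== Notes on version B (the rewrite author's own statement) =====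
-- stated objective: alternative
-- what changed: Replaces A's single pass that incrementally rewrites a (min,max) pair per product with a gather phase (dict of per-product value lists) followed by a reduce phase computing min/max of each list.
import Mathlib
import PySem

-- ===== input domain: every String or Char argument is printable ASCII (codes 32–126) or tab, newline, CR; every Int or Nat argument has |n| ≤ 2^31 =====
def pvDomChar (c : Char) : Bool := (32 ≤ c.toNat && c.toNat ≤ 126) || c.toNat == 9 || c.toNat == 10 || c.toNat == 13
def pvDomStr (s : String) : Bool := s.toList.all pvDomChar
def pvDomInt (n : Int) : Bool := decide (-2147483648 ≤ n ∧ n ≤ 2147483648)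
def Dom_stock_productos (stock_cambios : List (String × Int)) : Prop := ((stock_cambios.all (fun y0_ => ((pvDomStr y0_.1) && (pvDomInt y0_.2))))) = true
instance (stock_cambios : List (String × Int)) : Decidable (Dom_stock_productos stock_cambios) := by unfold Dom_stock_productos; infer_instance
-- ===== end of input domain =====

-- B replaces A's incremental (min,max)-pair tracking by a gather phase (per-product value lists) followed by a min/max reduce (alternative decomposition, same cost).

-- ===== PORT A =====
-- res[producto] (KeyError when absent) is guarded by the `contains` test, so getD's default (0, 0) is never used (exact).
def stock_productos (stock_cambios : List (String × Int)) : List (String × Int × Int) :=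
  let res := stock_cambios.foldl (fun res tupla =>
    let producto := tupla.1
    let nuevoValor := tupla.2
    if res.contains producto then
      let mayorYmenor := res.getD producto (0, 0)
      let mayor := mayorYmenor.2
      let menor := mayorYmenor.1
      if nuevoValor < menor then res.insert producto (nuevoValor, mayor)
      else if nuevoValor > mayor then res.insert producto (menor, nuevoValor)
      else res
    else res.insert producto (nuevoValor, nuevoValor)) PySem.Dict.empty
  res.items

-- ===== PORT B =====
-- min(valores)/max(valores): each bucket is nonempty by construction, so the .getD 0 default of min?/max? is never used (exact).
def stock_productos_alt (stock_cambios : List (String × Int)) : List (String × Int × Int) :=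
  let grupos := stock_cambios.foldl
    (fun d p => d.modify p.1 [] (fun vs => vs ++ [p.2])) PySem.Dict.empty
  grupos.items.map (fun kv =>
    (kv.1, (PySem.List.min? kv.2 id).getD 0, (PySem.List.max? kv.2 id).getD 0))

-- ===== PRECONDITION & SPEC =====
def Spec_stock_productos (stock_cambios : List (String × Int)) (out : List (String × Int × Int)) : Prop := out = stock_productos_alt stock_cambios
instance (stock_cambios : List (String × Int)) (out : List (String × Int × Int)) : Decidable (Spec_stock_productos stock_cambios out) := by unfold Spec_stock_productos; infer_instance

-- ===== CLAIM (what is proved, stated in full; the proofs are below) =====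
def Claim_equal_stock_productos : Prop := ∀ (stock_cambios : List (String × Int)), Dom_stock_productos stock_cambios → Spec_stock_productos stock_cambios (stock_productos stock_cambios)

-- ===== LEMMAS AND PROOFS =====

-- pvMn/pvMx: min(vs)/max(vs) as B computes them (total via the unused default 0).
def pvMn (vs : List Int) : Int := (PySem.List.min? vs id).getD 0
def pvMx (vs : List Int) : Int := (PySem.List.max? vs id).getD 0

theorem pv_min_cons2 (m a : Int) (t : List Int) :
    PySem.List.min? (m :: a :: t) id = PySem.List.min? (min m a :: t) id := by
  show List.foldl _ (if id a < id m then some a else some m) t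
     = List.foldl _ (some (min m a)) t
  congr 1
  simp only [id]
  split <;> next h => congr 1; omega

theorem pv_max_cons2 (m a : Int) (t : List Int) :
    PySem.List.max? (m :: a :: t) id = PySem.List.max? (max m a :: t) id := by
  show List.foldl _ (if id m < id a then some a else some m) t
     = List.foldl _ (some (max m a)) t
  congr 1
  simp only [id]
  split <;> next h => congr 1; omega

theorem pvMn_cons (m : Int) (l : List Int) : pvMn (m :: l) = l.foldl min m := by
  induction l generalizing m with
  | nil => rfl
  | cons a t ih =>
    calc pvMn (m :: a :: t) = pvMn (min m a :: t) := by unfold pvMn; rw [pv_min_cons2]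
      _ = t.foldl min (min m a) := ih _
      _ = (a :: t).foldl min m := rfl

theorem pvMx_cons (m : Int) (l : List Int) : pvMx (m :: l) = l.foldl max m := by
  induction l generalizing m with
  | nil => rfl
  | cons a t ih =>
    calc pvMx (m :: a :: t) = pvMx (max m a :: t) := by unfold pvMx; rw [pv_max_cons2]
      _ = t.foldl max (max m a) := ih _
      _ = (a :: t).foldl max m := rfl

theorem pvMn_append (vs : List Int) (h : vs ≠ []) (v : Int) : pvMn (vs ++ [v]) = min (pvMn vs) v := by
  obtain ⟨m, t, rfl⟩ := List.exists_cons_of_ne_nil h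
  rw [List.cons_append, pvMn_cons, pvMn_cons, List.foldl_append]; rfl

theorem pvMx_append (vs : List Int) (h : vs ≠ []) (v : Int) : pvMx (vs ++ [v]) = max (pvMx vs) v := by
  obtain ⟨m, t, rfl⟩ := List.exists_cons_of_ne_nil h
  rw [List.cons_append, pvMx_cons, pvMx_cons, List.foldl_append]; rfl

theorem pv_foldl_min_le_max (t : List Int) : ∀ a b : Int, a ≤ b → t.foldl min a ≤ t.foldl max b := by
  induction t with
  | nil => intro a b h; exact h
  | cons x t ih =>
    intro a b h
    simp only [List.foldl_cons]
    exact ih _ _ (by omega)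

theorem pvMn_le_pvMx (vs : List Int) (h : vs ≠ []) : pvMn vs ≤ pvMx vs := by
  obtain ⟨m, t, rfl⟩ := List.exists_cons_of_ne_nil h
  rw [pvMn_cons, pvMx_cons]
  exact pv_foldl_min_le_max t m m le_rfl

-- pvStepA: A's loop body (definitionally equal to the lambda in `stock_productos`).
def pvStepA (res : PySem.Dict String (Int × Int)) (tupla : String × Int) : PySem.Dict String (Int × Int) :=
  if res.contains tupla.1 then
    if tupla.2 < (res.getD tupla.1 (0, 0)).1 then res.insert tupla.1 (tupla.2, (res.getD tupla.1 (0, 0)).2)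
    else if tupla.2 > (res.getD tupla.1 (0, 0)).2 then res.insert tupla.1 ((res.getD tupla.1 (0, 0)).1, tupla.2)
    else res
  else res.insert tupla.1 (tupla.2, tupla.2)

-- pvStepG: B's grouping loop body.
def pvStepG (d : PySem.Dict String (List Int)) (p : String × Int) : PySem.Dict String (List Int) :=
  d.modify p.1 [] (fun vs => vs ++ [p.2])

-- pvMM: B's reduce phase applied to a grouping dict.
def pvMM (g : PySem.Dict String (List Int)) : PySem.Dict String (Int × Int) :=
  PySem.Dict.mk (g.items.map (fun kv => (kv.1, pvMn kv.2, pvMx kv.2)))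

theorem pv_keys_mm (g : PySem.Dict String (List Int)) : (pvMM g).keys = g.keys := by
  simp [pvMM, PySem.Dict.keys, List.map_map, Function.comp]

theorem pv_contains_mm (g : PySem.Dict String (List Int)) (k : String) :
    (pvMM g).contains k = g.contains k := by
  simp only [pvMM, PySem.Dict.contains, List.any_map]
  rfl

theorem pv_fst_inj {α β : Type} (l : List (α × β)) (h : (l.map Prod.fst).Nodup)
    {p q : α × β} (hp : p ∈ l) (hq : q ∈ l) (he : p.1 = q.1) : p = q := by
  induction l with
  | nil => cases hp
  | cons a t ih =>
    simp only [List.map_cons, List.nodup_cons] at h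
    rcases List.mem_cons.1 hp with rfl | hp' <;> rcases List.mem_cons.1 hq with rfl | hq'
    · rfl
    · exact absurd (he ▸ List.mem_map_of_mem hq') h.1
    · exact absurd (he ▸ List.mem_map_of_mem hp') h.1
    · exact ih h.2 hp' hq'

theorem pv_getD_mm (g : PySem.Dict String (List Int)) (k : String) (vs : List Int)
    (hnd : g.keys.Nodup) (hvs : g.get? k = some vs) :
    (pvMM g).getD k (0, 0) = (pvMn vs, pvMx vs) := by
  have hmem : (k, vs) ∈ g.items := PySem.Dict.mem_items_of_get?_eq_some g hvs
  have hmem' : (k, (pvMn vs, pvMx vs)) ∈ (pvMM g).items := by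
    simpa [pvMM] using List.mem_map_of_mem (f := fun kv => (kv.1, pvMn kv.2, pvMx kv.2)) hmem
  exact PySem.Dict.getD_of_mem_items _ hmem' (by rw [pv_keys_mm]; exact hnd) _

theorem pv_mm_insert (g : PySem.Dict String (List Int)) (k : String) (vs' : List Int) :
    pvMM (g.insert k vs') = (pvMM g).insert k (pvMn vs', pvMx vs') := by
  by_cases hc : g.contains k
  · apply PySem.Dict.ext
    rw [show (pvMM (g.insert k vs')).items = (g.insert k vs').items.map (fun kv => (kv.1, pvMn kv.2, pvMx kv.2)) from rfl]
    rw [PySem.Dict.items_insert_of_contains _ _ hc,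
        PySem.Dict.items_insert_of_contains _ _ (by rw [pv_contains_mm]; exact hc)]
    rw [show (pvMM g).items = g.items.map (fun kv => (kv.1, pvMn kv.2, pvMx kv.2)) from rfl]
    rw [List.map_map, List.map_map]
    apply List.map_congr_left
    intro p _
    by_cases hpk : p.1 == k <;> simp [Function.comp, hpk]
  · rw [Bool.not_eq_true] at hc
    apply PySem.Dict.ext
    rw [show (pvMM (g.insert k vs')).items = (g.insert k vs').items.map (fun kv => (kv.1, pvMn kv.2, pvMx kv.2)) from rfl]
    rw [PySem.Dict.items_insert_of_not_contains _ _ hc,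
        PySem.Dict.items_insert_of_not_contains _ _ (by rw [pv_contains_mm]; exact hc)]
    simp [pvMM]

theorem pv_insert_eq_self (d : PySem.Dict String (Int × Int)) (k : String) (v : Int × Int)
    (hnd : d.keys.Nodup) (h : d.get? k = some v) : d.insert k v = d := by
  have hc : d.contains k := by rw [PySem.Dict.contains_eq_isSome_get?, h]; rfl
  apply PySem.Dict.ext
  rw [PySem.Dict.items_insert_of_contains _ _ hc]
  have hkv : (k, v) ∈ d.items := PySem.Dict.mem_items_of_get?_eq_some d h
  conv_rhs => rw [← List.map_id d.items]
  apply List.map_congr_left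
  intro p hp
  by_cases hpk : p.1 == k
  · have : p = (k, v) := pv_fst_inj d.items hnd hp hkv (by simpa using hpk)
    simp [this]
  · simp [hpk]

theorem pv_step_comm (g : PySem.Dict String (List Int)) (x : String × Int)
    (hnd : g.keys.Nodup) (hne : ∀ p ∈ g.items, p.2 ≠ []) :
    pvStepA (pvMM g) x = pvMM (pvStepG g x) := by
  have hmod : pvStepG g x = g.insert x.1 (g.getD x.1 [] ++ [x.2]) := rfl
  by_cases hc : g.contains x.1
  · obtain ⟨vs, hvs⟩ : ∃ vs, g.get? x.1 = some vs := by
      rw [PySem.Dict.contains_eq_isSome_get?] at hc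
      exact Option.isSome_iff_exists.1 hc
    have hvne : vs ≠ [] := hne _ (PySem.Dict.mem_items_of_get?_eq_some g hvs)
    have hgd : g.getD x.1 [] = vs := PySem.Dict.getD_of_get?_eq_some g [] hvs
    rw [hmod, hgd, pv_mm_insert, pvMn_append vs hvne, pvMx_append vs hvne]
    have hmle : pvMn vs ≤ pvMx vs := pvMn_le_pvMx vs hvne
    unfold pvStepA
    rw [pv_contains_mm, if_pos hc, pv_getD_mm g x.1 vs hnd hvs]
    simp only
    by_cases h1 : x.2 < pvMn vs
    · rw [if_pos h1,
        show ((min (pvMn vs) x.2, max (pvMx vs) x.2) : Int × Int) = (x.2, pvMx vs) by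
          simp only [Prod.mk.injEq]; omega]
    · rw [if_neg h1]
      by_cases h2 : x.2 > pvMx vs
      · rw [if_pos h2,
          show ((min (pvMn vs) x.2, max (pvMx vs) x.2) : Int × Int) = (pvMn vs, x.2) by
            simp only [Prod.mk.injEq]; omega]
      · rw [if_neg h2,
          show ((min (pvMn vs) x.2, max (pvMx vs) x.2) : Int × Int) = (pvMn vs, pvMx vs) by
            simp only [Prod.mk.injEq]; omega]
        have hget' : (pvMM g).get? x.1 = some (pvMn vs, pvMx vs) := by
          rw [PySem.Dict.get?_eq_some_iff_mem_items _ _ _ (by rw [pv_keys_mm]; exact hnd)]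
          simpa [pvMM] using List.mem_map_of_mem (f := fun kv => (kv.1, pvMn kv.2, pvMx kv.2)) (PySem.Dict.mem_items_of_get?_eq_some g hvs)
        exact (pv_insert_eq_self _ _ _ (by rw [pv_keys_mm]; exact hnd) hget').symm
  · have hgd : g.getD x.1 [] = ([] : List Int) := PySem.Dict.getD_of_not_contains g ([] : List Int) (Bool.eq_false_iff.2 hc)
    rw [hmod, hgd, pv_mm_insert]
    unfold pvStepA
    rw [pv_contains_mm, if_neg (by simp [Bool.eq_false_iff.2 hc])]
    rfl

theorem pv_nodup_stepG (g : PySem.Dict String (List Int)) (x : String × Int)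
    (h : g.keys.Nodup) : (pvStepG g x).keys.Nodup :=
  PySem.Dict.nodup_keys_insert g x.1 _ h

theorem pv_ne_stepG (g : PySem.Dict String (List Int)) (x : String × Int)
    (hne : ∀ p ∈ g.items, p.2 ≠ []) : ∀ p ∈ (pvStepG g x).items, p.2 ≠ [] := by
  intro p hp
  have hp' : p ∈ (g.insert x.1 (g.getD x.1 [] ++ [x.2])).items := hp
  rcases (PySem.Dict.mem_items_insert _ _ _ p).1 hp' with rfl | ⟨hm, _⟩
  · simp
  · exact hne _ hm

theorem pv_main (l : List (String × Int)) : ∀ g : PySem.Dict String (List Int),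
    g.keys.Nodup → (∀ p ∈ g.items, p.2 ≠ []) →
    List.foldl pvStepA (pvMM g) l = pvMM (List.foldl pvStepG g l) := by
  induction l with
  | nil => intro g _ _; rfl
  | cons x t ih =>
    intro g hnd hne
    simp only [List.foldl_cons]
    rw [pv_step_comm g x hnd hne]
    exact ih _ (pv_nodup_stepG g x hnd) (pv_ne_stepG g x hne)

-- ===== VERDICT (by name: the statement is the Claim_ definition above) =====
theorem stock_productos_spec : Claim_equal_stock_productos := by
  intro l _
  show stock_productos l = stock_productos_alt l
  have h1 : stock_productos l = (l.foldl pvStepA (pvMM PySem.Dict.empty)).items := rfl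
  have h2 : stock_productos_alt l = (pvMM (l.foldl pvStepG PySem.Dict.empty)).items := rfl
  rw [h1, h2, pv_main l PySem.Dict.empty PySem.Dict.nodup_keys_empty (by intro p hp; cases hp)]
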